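-- pv_equiv track=rewrite | github.com/Demeter2025/AndroVET | tools.py | check_open_par
-- ===== SOURCE A (Python) =====
-- def check_open_par(string, x):
--     indices = []
--     if '(' not in string:
--         return [True, []]
--     open = 0
--     for index, char in enumerate(string):
--         if char == '(':
--             open += 1
--         elif char == ')':
--             open -= 1
--         elif char == x and open == 0 and string[index+1] != '>':
--             indices.append(index)
--     if len(indices) == 0:
--         return [False, []]
--     else:
--         return [True, indices]
-- ===== SOURCE B (Python) =====
-- def check_open_par(string, x):
--     if '(' not in string:
--         return [True, []]
--     # phase 1: prefix paren-depth table (depth BEFORE each position)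
--     depths = []
--     d = 0
--     for ch in string:
--         depths.append(d)
--         if ch == '(':
--             d += 1
--         elif ch == ')':
--             d -= 1
--     # phase 2: filter positions against the table
--     indices = [i for i in range(len(string))
--                if string[i] == x and string[i] not in '()'
--                and depths[i] == 0 and string[i + 1:i + 2] != '>']
--     return [True, indices] if indices else [False, []]
-- ===== Notes on version B (the rewrite author's own statement) =====
-- stated objective: alternative
-- what changed: A's single fused loop carrying (open, indices) state is replaced by a two-phase pipeline: first build a prefix paren-depth table, then select indices with a filtering comprehension over positions.
import Mathlib
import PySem

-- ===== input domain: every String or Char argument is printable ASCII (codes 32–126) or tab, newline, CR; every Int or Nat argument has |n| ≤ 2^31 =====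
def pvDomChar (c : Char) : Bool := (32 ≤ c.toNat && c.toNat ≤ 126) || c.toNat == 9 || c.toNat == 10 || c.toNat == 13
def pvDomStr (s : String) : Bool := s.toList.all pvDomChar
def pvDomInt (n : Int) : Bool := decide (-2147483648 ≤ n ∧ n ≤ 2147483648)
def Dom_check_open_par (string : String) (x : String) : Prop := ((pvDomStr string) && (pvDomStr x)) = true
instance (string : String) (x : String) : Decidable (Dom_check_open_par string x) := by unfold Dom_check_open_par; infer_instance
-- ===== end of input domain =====

-- B replaces A's single fused loop (open, indices) by a prefix-depth table plus a filtering pass; alternative decomposition, same cost.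

-- ===== PORT A =====
-- literal transliteration of A: one loop over enumerate(string) carrying (open, indices)
def check_open_par (string : String) (x : String) : Bool × List Int :=
  if PySem.Str.isIn "(" string = false then (true, [])
  else
    let r := (PySem.List.enumerate string.toList 0).foldl
      (fun (s : Int × List Int) p =>
        if p.2 = '(' then (s.1 + 1, s.2)
        else if p.2 = ')' then (s.1 - 1, s.2)
        else if x.toList = [p.2] ∧ s.1 = 0 ∧ PySem.Str.pyGet? string (p.1 + 1) ≠ some '>'
          then (s.1, s.2 ++ [p.1])
        else s)
      (0, [])
    if r.2.length = 0 then (false, []) else (true, r.2)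

-- ===== PORT B =====
-- literal transliteration of B: phase 1 builds the prefix-depth table, phase 2 filters positions
-- (string[i+1:i+2] is the nonnegative slice (drop (i+1)).take 1; string[i] with i < len is getD)
def check_open_par_alt (string : String) (x : String) : Bool × List Int :=
  if PySem.Str.isIn "(" string = false then (true, [])
  else
    let cs := string.toList
    let depths := (cs.foldl
      (fun (s : List Int × Int) ch =>
        (s.1 ++ [s.2], if ch = '(' then s.2 + 1 else if ch = ')' then s.2 - 1 else s.2))
      ([], 0)).1
    let indices := ((List.range cs.length).filter (fun i =>
        decide (x.toList = [cs.getD i ' '] ∧ cs.getD i ' ' ∉ ['(', ')']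
          ∧ depths.getD i 0 = 0 ∧ (cs.drop (i + 1)).take 1 ≠ ['>']))).map
      (fun i : Nat => (i : Int))
    if indices = [] then (false, []) else (true, indices)

-- ===== PRECONDITION & SPEC =====
-- Pre_ excludes exactly the inputs where A raises IndexError: '(' occurs, the last character is
-- not '(' or ')', equals x, and sits at paren depth 0, so A evaluates string[index+1] past the end.
def Pre_check_open_par (string : String) (x : String) : Prop :=
  ¬ (PySem.Str.isIn "(" string = true
     ∧ string.toList ≠ []
     ∧ x.toList = [string.toList.getLastD ' ']
     ∧ string.toList.getLastD ' ' ∉ ['(', ')']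
     ∧ string.toList.dropLast.count '(' = string.toList.dropLast.count ')')
instance (string : String) (x : String) : Decidable (Pre_check_open_par string x) := by
  unfold Pre_check_open_par; infer_instance
def pvWitness_check_open_par : String × String := ("(a)b>", "b")

def Spec_check_open_par (string : String) (x : String) (out : Bool × List Int) : Prop := out = check_open_par_alt string x
instance (string : String) (x : String) (out : Bool × List Int) : Decidable (Spec_check_open_par string x out) := by unfold Spec_check_open_par; infer_instance

-- ===== CLAIM (what is proved, stated in full; the proofs are below) =====
def Claim_equal_check_open_par : Prop := ∀ (string : String) (x : String), Dom_check_open_par string x → Pre_check_open_par string x → Spec_check_open_par string x (check_open_par string x)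
-- ===== LEMMAS AND PROOFS =====

/-- per-character depth change -/
def pvDelta (c : Char) : Int := if c = '(' then 1 else if c = ')' then -1 else 0

/-- paren balance of a character list -/
def pvBal (l : List Char) : Int := (l.map pvDelta).sum

lemma pvBal_nil : pvBal [] = 0 := rfl

lemma pvBal_cons (c : Char) (l : List Char) : pvBal (c :: l) = pvDelta c + pvBal l := by
  simp [pvBal]

lemma take_drop_one_ne (l : List Char) (n : Nat) :
    (((l.drop n).take 1 ≠ ['>']) ↔ l[n]? ≠ some '>') := by
  have h : (l.drop n).head? = l[n]? := List.head?_drop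
  cases hd : l.drop n with
  | nil => rw [hd] at h; simp [← h]
  | cons a t => rw [hd] at h; simp [← h]

/-- one step of A's loop, uniformly over the three branches -/
lemma stepA_eq (string x : String) (c : Char) (s d : Int) (acc : List Int) :
    (if c = '(' then (d + 1, acc)
     else if c = ')' then (d - 1, acc)
     else if x.toList = [c] ∧ d = 0 ∧ PySem.Str.pyGet? string (s + 1) ≠ some '>'
       then (d, acc ++ [s])
     else (d, acc))
    = ((d + pvDelta c : Int),
       acc ++ (if c ≠ '(' ∧ c ≠ ')' ∧ x.toList = [c] ∧ d = 0
                  ∧ PySem.Str.pyGet? string (s + 1) ≠ some '>' then [s] else [])) := by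
  by_cases hc1 : c = '('
  · subst hc1
    rw [if_pos rfl, if_neg (by simp), List.append_nil]
    simp [pvDelta]
  · by_cases hc2 : c = ')'
    · subst hc2
      rw [if_neg (by decide), if_pos rfl, if_neg (by simp), List.append_nil]
      simp [pvDelta, hc1]
      ring
    · rw [if_neg hc1, if_neg hc2]
      have hδ : pvDelta c = 0 := by simp [pvDelta, hc1, hc2]
      by_cases hcond : x.toList = [c] ∧ d = 0 ∧ PySem.Str.pyGet? string (s + 1) ≠ some '>'
      · rw [if_pos hcond, if_pos ⟨hc1, hc2, hcond⟩, hδ, add_zero]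
      · rw [if_neg hcond, if_neg (by rintro ⟨_, _, h⟩; exact hcond h), hδ, add_zero,
          List.append_nil]

/-- shifting A's filtered index set across the head character -/
lemma filterA_cons (string x : String) (c : Char) (t : List Char) (s d : Int) :
    ((List.range (c :: t).length).filter (fun i =>
        decide ((c :: t).getD i ' ' ≠ '(' ∧ (c :: t).getD i ' ' ≠ ')'
          ∧ x.toList = [(c :: t).getD i ' ']
          ∧ d + pvBal ((c :: t).take i) = 0
          ∧ PySem.Str.pyGet? string (s + (i : Int) + 1) ≠ some '>'))).map
      (fun i : Nat => s + (i : Int))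
    = (if c ≠ '(' ∧ c ≠ ')' ∧ x.toList = [c] ∧ d = 0
          ∧ PySem.Str.pyGet? string (s + 1) ≠ some '>' then [s] else [])
      ++ ((List.range t.length).filter (fun i =>
          decide (t.getD i ' ' ≠ '(' ∧ t.getD i ' ' ≠ ')' ∧ x.toList = [t.getD i ' ']
            ∧ (d + pvDelta c) + pvBal (t.take i) = 0
            ∧ PySem.Str.pyGet? string ((s + 1) + (i : Int) + 1) ≠ some '>'))).map
        (fun i : Nat => (s + 1) + (i : Int)) := by
  have hrange : List.range (c :: t).length = 0 :: (List.range t.length).map Nat.succ := by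
    simp [List.range_succ_eq_map]
  rw [hrange, List.filter_cons, List.filter_map]
  have hshift : (List.range t.length).filter
        ((fun i => decide ((c :: t).getD i ' ' ≠ '(' ∧ (c :: t).getD i ' ' ≠ ')'
          ∧ x.toList = [(c :: t).getD i ' ']
          ∧ d + pvBal ((c :: t).take i) = 0
          ∧ PySem.Str.pyGet? string (s + (i : Int) + 1) ≠ some '>')) ∘ Nat.succ)
      = (List.range t.length).filter (fun i =>
          decide (t.getD i ' ' ≠ '(' ∧ t.getD i ' ' ≠ ')' ∧ x.toList = [t.getD i ' ']
            ∧ (d + pvDelta c) + pvBal (t.take i) = 0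
            ∧ PySem.Str.pyGet? string ((s + 1) + (i : Int) + 1) ≠ some '>')) := by
    apply List.filter_congr; intro i _
    simp only [Function.comp_def, List.getD_cons_succ, List.take_succ_cons, pvBal_cons,
      decide_eq_decide]
    have harith : s + ((i : Nat) + 1 : Nat) + 1 = (s + 1) + (i : Int) + 1 := by push_cast; ring
    rw [harith]
    constructor <;> (rintro ⟨h1, h2, h3, h4, h5⟩; exact ⟨h1, h2, h3, by linarith, h5⟩)
  rw [hshift]
  by_cases hcond : c ≠ '(' ∧ c ≠ ')' ∧ x.toList = [c] ∧ d = 0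
      ∧ PySem.Str.pyGet? string (s + 1) ≠ some '>'
  · rw [if_pos hcond]
    have h0 : (decide ((c :: t).getD 0 ' ' ≠ '(' ∧ (c :: t).getD 0 ' ' ≠ ')'
        ∧ x.toList = [(c :: t).getD 0 ' ']
        ∧ d + pvBal ((c :: t).take 0) = 0
        ∧ PySem.Str.pyGet? string (s + ((0 : Nat) : Int) + 1) ≠ some '>')) = true := by
      simp only [List.getD_cons_zero, List.take_zero, pvBal_nil, decide_eq_true_eq]
      obtain ⟨h1, h2, h3, h4, h5⟩ := hcond
      exact ⟨h1, h2, h3, by omega, by simpa using h5⟩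
    rw [h0, if_pos rfl, List.map_cons, List.map_map]
    simp only [Nat.cast_zero, add_zero, List.singleton_append, List.cons.injEq]
    refine ⟨trivial, ?_⟩
    apply List.map_congr_left; intro i _
    simp only [Function.comp_def]; push_cast; ring
  · rw [if_neg hcond]
    have h0 : (decide ((c :: t).getD 0 ' ' ≠ '(' ∧ (c :: t).getD 0 ' ' ≠ ')'
        ∧ x.toList = [(c :: t).getD 0 ' ']
        ∧ d + pvBal ((c :: t).take 0) = 0
        ∧ PySem.Str.pyGet? string (s + ((0 : Nat) : Int) + 1) ≠ some '>')) = false := by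
      simp only [List.getD_cons_zero, List.take_zero, pvBal_nil, decide_eq_false_iff_not]
      rintro ⟨h1, h2, h3, h4, h5⟩
      exact hcond ⟨h1, h2, h3, by omega, by simpa using h5⟩
    rw [h0, if_neg (by simp), List.map_map]
    apply List.map_congr_left; intro i _
    simp only [Function.comp_def]; push_cast; ring

/-- characterisation of A's fused fold -/
lemma foldA_spec (string x : String) : ∀ (l : List Char) (s d : Int) (acc : List Int),
    (PySem.List.enumerate l s).foldl
      (fun (st : Int × List Int) p =>
        if p.2 = '(' then (st.1 + 1, st.2)
        else if p.2 = ')' then (st.1 - 1, st.2)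
        else if x.toList = [p.2] ∧ st.1 = 0 ∧ PySem.Str.pyGet? string (p.1 + 1) ≠ some '>'
          then (st.1, st.2 ++ [p.1])
        else st)
      (d, acc)
    = (d + pvBal l,
       acc ++ ((List.range l.length).filter (fun i =>
          decide (l.getD i ' ' ≠ '(' ∧ l.getD i ' ' ≠ ')' ∧ x.toList = [l.getD i ' ']
            ∧ d + pvBal (l.take i) = 0
            ∧ PySem.Str.pyGet? string (s + (i : Int) + 1) ≠ some '>'))).map
        (fun i : Nat => s + (i : Int))) := by
  intro l
  induction l with
  | nil => intro s d acc; simp [PySem.List.enumerate_nil, pvBal_nil]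
  | cons c t ih =>
    intro s d acc
    rw [PySem.List.enumerate_cons, List.foldl_cons]
    dsimp only
    rw [stepA_eq string x c s d acc,
      ih (s + 1) (d + pvDelta c), filterA_cons string x c t s d]
    refine Prod.ext ?_ ?_
    · simp only [pvBal_cons]; ring
    · simp [List.append_assoc]

/-- characterisation of B's depth-table fold -/
lemma foldB_spec : ∀ (l : List Char) (acc : List Int) (d : Int),
    (l.foldl
      (fun (s : List Int × Int) ch =>
        (s.1 ++ [s.2], if ch = '(' then s.2 + 1 else if ch = ')' then s.2 - 1 else s.2))
      (acc, d))
    = (acc ++ (List.range l.length).map (fun i => d + pvBal (l.take i)), d + pvBal l) := by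
  intro l
  induction l with
  | nil => intro acc d; simp [pvBal_nil]
  | cons c t ih =>
    intro acc d
    rw [List.foldl_cons]
    have hstep : (if c = '(' then d + 1 else if c = ')' then d - 1 else d) = d + pvDelta c := by
      simp [pvDelta]; split_ifs <;> ring
    rw [hstep, ih (acc ++ [d]) (d + pvDelta c)]
    refine Prod.ext ?_ ?_
    · simp only [List.length_cons, List.range_succ_eq_map, List.map_cons, List.map_map,
        List.take_zero, pvBal_nil, List.append_assoc]
      congr 1
      simp only [List.singleton_append, List.cons.injEq]
      refine ⟨by ring, ?_⟩
      apply List.map_congr_left; intro i _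
      simp [pvBal_cons]; ring
    · simp [pvBal_cons]; ring

theorem check_open_par_spec : Claim_equal_check_open_par := by
  intro string x _ _
  unfold Spec_check_open_par check_open_par check_open_par_alt
  by_cases hg : PySem.Str.isIn "(" string = false
  · rw [if_pos hg, if_pos hg]
  · rw [if_neg hg, if_neg hg]
    simp only
    rw [foldA_spec string x string.toList 0 0 [], foldB_spec string.toList [] 0]
    simp only [List.nil_append]
    have hfilter : ((List.range string.toList.length).filter (fun i =>
          decide (string.toList.getD i ' ' ≠ '(' ∧ string.toList.getD i ' ' ≠ ')'
            ∧ x.toList = [string.toList.getD i ' ']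
            ∧ (0 : Int) + pvBal (string.toList.take i) = 0
            ∧ PySem.Str.pyGet? string ((0 : Int) + (i : Int) + 1) ≠ some '>')))
        = ((List.range string.toList.length).filter (fun i =>
            decide (x.toList = [string.toList.getD i ' ']
              ∧ string.toList.getD i ' ' ∉ ['(', ')']
              ∧ ((List.range string.toList.length).map
                  (fun j => (0 : Int) + pvBal (string.toList.take j))).getD i 0 = 0
              ∧ (string.toList.drop (i + 1)).take 1 ≠ ['>']))) := by
      apply List.filter_congr; intro i hi
      rw [List.mem_range] at hi
      have hdep : ((List.range string.toList.length).map
            (fun j => (0 : Int) + pvBal (string.toList.take j))).getD i 0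
          = (0 : Int) + pvBal (string.toList.take i) := by
        rw [List.getD_eq_getElem _ _ (by simpa using hi)]
        simp
      have hget : PySem.Str.pyGet? string ((0 : Int) + (i : Int) + 1)
          = string.toList[i + 1]? := by
        have h1 : (0 : Int) + (i : Int) + 1 = ((i + 1 : Nat) : Int) := by push_cast; ring
        rw [h1, PySem.Str.pyGet?_natCast]
      simp only [decide_eq_decide, hdep, hget, take_drop_one_ne, List.mem_cons,
        List.not_mem_nil]
      constructor
      · rintro ⟨h1, h2, h3, h4, h5⟩; exact ⟨h3, by tauto, h4, h5⟩
      · rintro ⟨h1, h2, h3, h4⟩; exact ⟨by tauto, by tauto, h1, h3, h4⟩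
    rw [hfilter]
    simp only [zero_add, List.length_eq_zero_iff]
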